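-- pv_equiv track=rewrite | github.com/fkie-cad/keys-in-flux-paper-material | SSH/openSSH/research_experiment/openssh_kex_lldb.py | find_masked
-- ===== SOURCE A (Python) =====
-- def find_masked(mem, pattern, mask):
--     plen = len(pattern)
--     mlen = len(mem)
--     if mlen < plen:
--         return -1
--     for off in range(0, mlen - plen + 1):
--         ok = True
--         for i in range(plen):
--             if mask[i] != 0 and mem[off + i] != pattern[i]:
--                 ok = False
--                 break
--         if ok:
--             return off
--     return -1
-- ===== SOURCE B (Python) =====
-- def find_masked(mem, pattern, mask):
--     plen = len(pattern)
--     mlen = len(mem)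
--     if mlen < plen:
--         return -1
--     # candidate-elimination: start with every offset, filter per masked position
--     cands = list(range(mlen - plen + 1))
--     for i in range(plen):
--         if mask[i] != 0:
--             p = pattern[i]
--             cands = [off for off in cands if mem[off + i] == p]
--     return cands[0] if cands else -1
-- ===== Notes on version B (the rewrite author's own statement) =====
-- stated objective: alternative
-- what changed: B swaps the loop nesting: instead of scanning offsets with an inner per-offset mask check, it keeps a list of candidate offsets and for each masked pattern position makes one pass eliminating the candidates that mismatch there, returning the smallest survivor.
-- outside the precondition, e.g. on find_masked([0, 0], [1, 1], [1]): A returns -1, B raises IndexError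
import Mathlib
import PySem

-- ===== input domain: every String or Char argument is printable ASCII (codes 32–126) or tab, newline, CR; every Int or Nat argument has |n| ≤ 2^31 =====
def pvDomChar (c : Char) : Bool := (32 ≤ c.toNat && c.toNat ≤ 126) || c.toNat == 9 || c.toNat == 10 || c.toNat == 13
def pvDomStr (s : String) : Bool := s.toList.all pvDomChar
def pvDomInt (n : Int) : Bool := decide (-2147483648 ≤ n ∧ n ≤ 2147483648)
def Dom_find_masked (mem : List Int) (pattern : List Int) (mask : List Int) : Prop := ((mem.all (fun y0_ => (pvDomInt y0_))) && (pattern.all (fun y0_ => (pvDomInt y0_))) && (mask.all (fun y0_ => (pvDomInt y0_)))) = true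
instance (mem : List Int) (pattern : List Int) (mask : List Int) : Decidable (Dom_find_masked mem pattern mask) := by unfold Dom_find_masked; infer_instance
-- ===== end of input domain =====

-- B swaps the loop nesting: a candidate-offset list is filtered once per masked
-- pattern position and the smallest survivor is returned (alternative decomposition).

-- ===== PORT A =====
-- inner 'for i in range(plen)' loop with break: returns the flag ok
def pvA_inner (mem : List Int) (pattern : List Int) (mask : List Int) (off : Nat) : List Nat → Bool
  | [] => true
  | i :: rest =>
      if mask.getD i 0 ≠ 0 ∧ mem.getD (off + i) 0 ≠ pattern.getD i 0 then false
      else pvA_inner mem pattern mask off rest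

-- outer 'for off in range(0, mlen - plen + 1)' loop with early return
def pvA_outer (mem : List Int) (pattern : List Int) (mask : List Int) : List Nat → Int
  | [] => -1
  | off :: rest =>
      if pvA_inner mem pattern mask off (List.range pattern.length) then (off : Int)
      else pvA_outer mem pattern mask rest

def find_masked (mem : List Int) (pattern : List Int) (mask : List Int) : Int :=
  if mem.length < pattern.length then -1
  else pvA_outer mem pattern mask (List.range (mem.length - pattern.length + 1))

-- ===== PORT B =====
-- 'for i in range(plen): if mask[i] != 0: cands = [off for off in cands if mem[off+i] == pattern[i]]'
def pvB_step (mem : List Int) (pattern : List Int) (mask : List Int) (cands : List Nat) (i : Nat) : List Nat :=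
  if mask.getD i 0 ≠ 0 then cands.filter (fun off => mem.getD (off + i) 0 == pattern.getD i 0)
  else cands

def find_masked_alt (mem : List Int) (pattern : List Int) (mask : List Int) : Int :=
  if mem.length < pattern.length then -1
  else
    match (List.range pattern.length).foldl (pvB_step mem pattern mask)
            (List.range (mem.length - pattern.length + 1)) with
    | [] => -1
    | off :: _ => (off : Int)

-- ===== PRECONDITION & SPEC =====
-- Pre_ excludes mask shorter than pattern (except when mem is shorter than pattern, where
-- both return -1 before touching mask): there A indexes mask[i] out of range and usually
-- raises IndexError, and on the inputs where A still returns -1 (every offset mismatches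
-- before reaching the end of mask) B's pass over range(plen) raises instead.
def Pre_find_masked (mem : List Int) (pattern : List Int) (mask : List Int) : Prop :=
  pattern.length ≤ mask.length ∨ mem.length < pattern.length
instance (mem : List Int) (pattern : List Int) (mask : List Int) : Decidable (Pre_find_masked mem pattern mask) := by unfold Pre_find_masked; infer_instance

def pvWitness_find_masked : List Int × List Int × List Int := ([1, 2, 3], [2], [1])

def Spec_find_masked (mem : List Int) (pattern : List Int) (mask : List Int) (out : Int) : Prop := out = find_masked_alt mem pattern mask
instance (mem : List Int) (pattern : List Int) (mask : List Int) (out : Int) : Decidable (Spec_find_masked mem pattern mask out) := by unfold Spec_find_masked; infer_instance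

-- ===== CLAIM (what is proved, stated in full; the proofs are below) =====
def Claim_equal_find_masked : Prop := ∀ (mem : List Int) (pattern : List Int) (mask : List Int), Dom_find_masked mem pattern mask → Pre_find_masked mem pattern mask → Spec_find_masked mem pattern mask (find_masked mem pattern mask)

-- ===== LEMMAS AND PROOFS =====

-- B's staged filtering over an index list keeps exactly the candidates that pass
-- A's inner scan over that same index list.
lemma pv_fold_filter (mem pattern mask : List Int) (is : List Nat) (cands : List Nat) :
    is.foldl (pvB_step mem pattern mask) cands =
      cands.filter (fun off => pvA_inner mem pattern mask off is) := by
  induction is generalizing cands with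
  | nil => simp [pvA_inner]
  | cons i rest ih =>
      simp only [List.foldl_cons, ih, pvB_step]
      by_cases hm : mask.getD i 0 ≠ 0
      · simp only [if_pos hm, List.filter_filter]
        apply List.filter_congr
        intro off _
        simp only [List.getD_eq_getElem?_getD] at hm
        by_cases he : (mem[off + i]?.getD 0 : Int) = pattern[i]?.getD 0
        · simp [pvA_inner, List.getD_eq_getElem?_getD, hm, he]
        · simp [pvA_inner, List.getD_eq_getElem?_getD, hm, he]
      · simp only [if_neg hm]
        apply List.filter_congr
        intro off _
        simp only [List.getD_eq_getElem?_getD] at hm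
        simp [pvA_inner, List.getD_eq_getElem?_getD, not_not.mp hm]

-- A's early-exit offset scan returns the head of the filtered offset list (-1 if none).
lemma pv_outer_head (mem pattern mask : List Int) (offs : List Nat) :
    pvA_outer mem pattern mask offs =
      (match offs.filter (fun off => pvA_inner mem pattern mask off (List.range pattern.length)) with
       | [] => (-1 : Int)
       | off :: _ => (off : Int)) := by
  induction offs with
  | nil => rfl
  | cons off rest ih =>
      by_cases h : pvA_inner mem pattern mask off (List.range pattern.length)
      · simp [pvA_outer, h]
      · simp [pvA_outer, h, ih]

-- ===== VERDICT (by name: the statement is the Claim_ definition above) =====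
theorem find_masked_spec : Claim_equal_find_masked := by
  intro mem pattern mask _ _
  unfold Spec_find_masked find_masked find_masked_alt
  by_cases h : mem.length < pattern.length
  · simp [h]
  · simp only [if_neg h, pv_fold_filter, pv_outer_head]
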